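-- pv_equiv track=rewrite | github.com/moonshot-cyber/agent-health-monitor | monitor.py | _calc_retry_storm_score
-- ===== SOURCE A (Python) =====
-- def _calc_retry_storm_score(transactions: list[dict]) -> tuple[int, int]:
--     """Retry storm frequency. Returns (score, storm_events)."""
--     groups: dict[str, list[int]] = {}
--     for tx in transactions:
--         to_addr = (tx.get("to") or "").lower()
--         inp = tx.get("input", "0x")
--         key = f"{to_addr}:{inp}"
--         try:
--             ts = int(tx.get("timeStamp", 0))
--             groups.setdefault(key, []).append(ts)
--         except (ValueError, TypeError):
--             continue
--
--     storm_events = 0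
--     for key, timestamps in groups.items():
--         if len(timestamps) < 3:
--             continue
--         sorted_ts = sorted(timestamps)
--         window_start = sorted_ts[0]
--         window_count = 1
--         for ts in sorted_ts[1:]:
--             if ts - window_start <= 300:
--                 window_count += 1
--             else:
--                 if window_count >= 3:
--                     storm_events += 1
--                 window_start = ts
--                 window_count = 1
--         if window_count >= 3:
--             storm_events += 1
--
--     if storm_events == 0:
--         score = 100
--     elif storm_events <= 2:
--         score = 70 - storm_events * 10
--     elif storm_events <= 5:
--         score = 50 - (storm_events - 2) * 10
--     else:
--         score = max(0, 20 - (storm_events - 5) * 5)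
--
--     return score, storm_events
-- ===== SOURCE B (Python) =====
-- def _storm_runs(ts):
--     """Count fixed-anchor 300s windows holding >= 3 of the sorted timestamps ts."""
--     events = 0
--     while ts:
--         anchor = ts[0]
--         run = 1
--         while run < len(ts) and ts[run] - anchor <= 300:
--             run += 1
--         if run >= 3:
--             events += 1
--         ts = ts[run:]
--     return events
--
--
-- def _calc_retry_storm_score(transactions):
--     """Retry storm frequency. Returns (score, storm_events)."""
--     pairs = []
--     for tx in transactions:
--         key = f"{(tx.get('to') or '').lower()}:{tx.get('input', '0x')}"
--         try:
--             ts = int(tx.get("timeStamp", 0))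
--         except (ValueError, TypeError):
--             continue
--         pairs.append((key, ts))
--
--     storm_events = 0
--     seen = set()
--     for key, _ in pairs:
--         if key in seen:
--             continue
--         seen.add(key)
--         storm_events += _storm_runs(sorted(t for k, t in pairs if k == key))
--
--     if storm_events == 0:
--         score = 100
--     elif storm_events <= 2:
--         score = 70 - storm_events * 10
--     elif storm_events <= 5:
--         score = 50 - (storm_events - 2) * 10
--     else:
--         score = max(0, 20 - (storm_events - 5) * 5)
--
--     return score, storm_events
-- ===== Notes on version B (the rewrite author's own statement) =====
-- stated objective: alternative
-- what changed: Replaces the dict-of-lists index and the (window_start, window_count) accumulator loop by a flat (key, ts) pair list scanned per first-seen key, with the storm count computed by a run-splitting two-pointer scan over the sorted timestamps.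
import Mathlib
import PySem

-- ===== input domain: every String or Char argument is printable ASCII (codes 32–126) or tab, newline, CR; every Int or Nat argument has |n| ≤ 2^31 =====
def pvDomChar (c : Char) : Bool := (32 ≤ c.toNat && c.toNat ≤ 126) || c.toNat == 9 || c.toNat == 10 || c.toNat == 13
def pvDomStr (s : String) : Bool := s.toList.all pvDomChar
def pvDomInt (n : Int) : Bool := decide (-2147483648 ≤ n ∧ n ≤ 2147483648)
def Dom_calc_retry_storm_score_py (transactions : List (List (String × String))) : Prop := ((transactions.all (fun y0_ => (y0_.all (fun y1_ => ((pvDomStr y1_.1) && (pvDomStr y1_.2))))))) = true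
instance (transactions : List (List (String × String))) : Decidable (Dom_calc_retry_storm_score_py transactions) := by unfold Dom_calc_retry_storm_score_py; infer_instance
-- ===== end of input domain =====

-- B replaces A's dict-of-lists index and accumulator window loop by a flat (key, ts)
-- list scanned per first-seen key plus a run-splitting scan (objective: alternative).

-- ===== PORT A =====
-- shared with port B: both Pythons compute the key / timestamp of a tx by identical expressions
def pvKey (tx : List (String × String)) : String :=
  let d : PySem.Dict String String := PySem.Dict.mk tx
  PySem.Str.lower ((d.get? "to").getD "") ++ ":" ++ d.getD "input" "0x"

-- int(tx.get("timeStamp", 0)): a missing key gives the int default 0; none = ValueError (skipped)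
def pvTs? (tx : List (String × String)) : Option Int :=
  match (PySem.Dict.mk tx : PySem.Dict String String).get? "timeStamp" with
  | none => some 0
  | some s => PySem.Int.ofStr? s

-- shared with port B: both Pythons end with the identical piecewise score expression
def pvScore (storm_events : Int) : Int :=
  if storm_events = 0 then 100
  else if storm_events ≤ 2 then 70 - storm_events * 10
  else if storm_events ≤ 5 then 50 - (storm_events - 2) * 10
  else max 0 (20 - (storm_events - 5) * 5)

-- one iteration of A's first loop: groups.setdefault(key, []).append(ts) (= d[k] = d.get(k, []) + [ts])
def pvInsertTx (d : PySem.Dict String (List Int)) (tx : List (String × String)) : PySem.Dict String (List Int) :=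
  match pvTs? tx with
  | none => d
  | some ts => d.modify (pvKey tx) [] (· ++ [ts])

-- one iteration of A's inner window loop; state = (window_start, window_count, storm_events)
def pvWinStep (st : Int × Int × Int) (ts : Int) : Int × Int × Int :=
  if ts - st.1 ≤ 300 then (st.1, st.2.1 + 1, st.2.2)
  else (ts, 1, if st.2.1 ≥ 3 then st.2.2 + 1 else st.2.2)

-- one iteration of A's loop over groups.items()
def pvGroupStep (storm : Int) (kv : String × List Int) : Int :=
  if kv.2.length < 3 then storm
  else
    match PySem.List.sorted kv.2 (fun x => x) false with
    | [] => storm   -- unreachable: len(timestamps) ≥ 3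
    | w0 :: rest =>
      let st := rest.foldl pvWinStep (w0, 1, storm)
      if st.2.1 ≥ 3 then st.2.2 + 1 else st.2.2

def calc_retry_storm_score_py (transactions : List (List (String × String))) : Int × Int :=
  let groups := transactions.foldl pvInsertTx PySem.Dict.empty
  let storm_events := groups.items.foldl pvGroupStep 0
  (pvScore storm_events, storm_events)

-- ===== PORT B =====
-- B's inner 'while run < len(ts) and ts[run] - anchor <= 300: run += 1' scanning ts[1:]
def pvRunLen (anchor : Int) : List Int → Nat
  | [] => 0
  | u :: us => if u - anchor ≤ 300 then pvRunLen anchor us + 1 else 0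

-- B's outer 'while ts: … ts = ts[run:]' loop of _storm_runs
def pvStorms : List Int → Int
  | [] => 0
  | t :: rest =>
    let run := 1 + pvRunLen t rest
    (if run ≥ 3 then 1 else 0) + pvStorms ((t :: rest).drop run)
termination_by l => l.length
decreasing_by simp [List.length_drop]

-- one iteration of B's pair-collecting loop
def pvCollect (acc : List (String × Int)) (tx : List (String × String)) : List (String × Int) :=
  match pvTs? tx with
  | none => acc
  | some ts => acc ++ [(pvKey tx, ts)]

-- one iteration of B's first-seen-key loop; state = (seen, storm_events)
def pvSeenStep (pairs : List (String × Int)) (st : PySem.Set String × Int) (p : String × Int) :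
    PySem.Set String × Int :=
  if PySem.Set.contains st.1 p.1 then st
  else (PySem.Set.add st.1 p.1,
        st.2 + pvStorms (PySem.List.sorted ((pairs.filter (fun q => q.1 == p.1)).map (·.2)) (fun x => x) false))

def calc_retry_storm_score_py_alt (transactions : List (List (String × String))) : Int × Int :=
  let pairs := transactions.foldl pvCollect []
  let st := pairs.foldl (pvSeenStep pairs) (PySem.Set.empty, 0)
  let storm_events := st.2
  (pvScore storm_events, storm_events)

-- ===== PRECONDITION & SPEC =====
def Spec_calc_retry_storm_score_py (transactions : List (List (String × String))) (out : Int × Int) : Prop := out = calc_retry_storm_score_py_alt transactions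
instance (transactions : List (List (String × String))) (out : Int × Int) : Decidable (Spec_calc_retry_storm_score_py transactions out) := by unfold Spec_calc_retry_storm_score_py; infer_instance

-- ===== CLAIM (what is proved, stated in full; the proofs are below) =====
def Claim_equal_calc_retry_storm_score_py : Prop := ∀ (transactions : List (List (String × String))), Dom_calc_retry_storm_score_py transactions → Spec_calc_retry_storm_score_py transactions (calc_retry_storm_score_py transactions)

-- ===== LEMMAS AND PROOFS =====

-- the valid (key, ts) pairs, in transaction order
def pvPairs (transactions : List (List (String × String))) : List (String × Int) :=
  transactions.filterMap (fun tx => (pvTs? tx).map (fun ts => (pvKey tx, ts)))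

-- per-key storm contribution, as both sides compute it
def pvG (P : List (String × Int)) (k : String) : Int :=
  pvStorms (PySem.List.sorted ((P.filter (fun q => q.1 == k)).map (·.2)) (fun x => x) false)

-- A's end-of-group step
def pvFinish (st : Int × Int × Int) : Int := if st.2.1 ≥ 3 then st.2.2 + 1 else st.2.2

theorem pvStorms_nil : pvStorms [] = 0 := by rw [pvStorms.eq_def]

theorem pvStorms_cons (t : Int) (rest : List Int) :
    pvStorms (t :: rest)
      = (if 1 + pvRunLen t rest ≥ 3 then 1 else 0) + pvStorms (rest.drop (pvRunLen t rest)) := by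
  have hdrop : (t :: rest).drop (1 + pvRunLen t rest) = rest.drop (pvRunLen t rest) := by
    rw [Nat.add_comm]; exact List.drop_succ_cons
  conv_lhs => rw [pvStorms.eq_def]
  simp only [hdrop]

theorem pvStorms_one (a : Int) : pvStorms [a] = 0 := by
  rw [pvStorms_cons]; simp [pvRunLen, pvStorms_nil]

theorem pvStorms_short (l : List Int) (h : l.length < 3) : pvStorms l = 0 := by
  match l with
  | [] => exact pvStorms_nil
  | [a] => exact pvStorms_one a
  | [a, b] =>
    rw [pvStorms_cons]
    by_cases hb : b - a ≤ 300
    · simp [pvRunLen, hb, pvStorms_nil]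
    · simp [pvRunLen, hb, pvStorms_one]
  | a :: b :: c :: rest => simp at h; omega

-- A's window loop, from an arbitrary state, equals the run-splitting recursion of B
theorem pvW (l : List Int) (ws c se : Int) :
    pvFinish (l.foldl pvWinStep (ws, c, se))
      = se + (if (3:Int) ≤ c + (pvRunLen ws l : Int) then 1 else 0)
          + pvStorms (l.drop (pvRunLen ws l)) := by
  induction l generalizing ws c se with
  | nil => simp only [List.foldl_nil, pvFinish, pvRunLen, List.drop_nil, pvStorms_nil]
           split_ifs <;> omega
  | cons u l' ih =>
    by_cases h : u - ws ≤ 300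
    · simp only [List.foldl_cons, pvWinStep, if_pos h, pvRunLen, ih, List.drop_succ_cons]
      split_ifs <;> omega
    · simp only [List.foldl_cons, pvWinStep, pvRunLen, ih, if_neg h, List.drop_zero,
        Nat.cast_zero]
      rw [pvStorms_cons]
      split_ifs <;> push_cast at * <;> omega

theorem pvGroupStep_eq (storm : Int) (kv : String × List Int) :
    pvGroupStep storm kv = storm + pvStorms (PySem.List.sorted kv.2 (fun x => x) false) := by
  unfold pvGroupStep
  by_cases h : kv.2.length < 3
  · rw [if_pos h, pvStorms_short _ (by rw [PySem.List.length_sorted]; omega)]; omega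
  · rw [if_neg h]
    cases hs : PySem.List.sorted kv.2 (fun x => x) false with
    | nil =>
      exfalso
      have := PySem.List.length_sorted (xs := kv.2) (key := fun x => x) (rev := false)
      rw [hs] at this; simp at this; omega
    | cons w0 rest =>
      show pvFinish (rest.foldl pvWinStep (w0, 1, storm)) = _
      rw [pvW, pvStorms_cons]
      split_ifs <;> push_cast at * <;> omega

theorem pvFoldGroup (items : List (String × List Int)) (s : Int) :
    items.foldl pvGroupStep s
      = s + (items.map (fun kv => pvStorms (PySem.List.sorted kv.2 (fun x => x) false))).sum := by
  induction items generalizing s with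
  | nil => simp
  | cons kv items ih =>
    simp only [List.foldl_cons, List.map_cons, List.sum_cons, ih, pvGroupStep_eq]
    omega

theorem pvPairs_cons_none {tx : List (String × String)} (txs : List (List (String × String)))
    (h : pvTs? tx = none) : pvPairs (tx :: txs) = pvPairs txs := by
  simp [pvPairs, h]

theorem pvPairs_cons_some {tx : List (String × String)} {ts : Int}
    (txs : List (List (String × String))) (h : pvTs? tx = some ts) :
    pvPairs (tx :: txs) = (pvKey tx, ts) :: pvPairs txs := by
  simp [pvPairs, h]

theorem pvBuildA (txs : List (List (String × String))) (d : PySem.Dict String (List Int)) :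
    txs.foldl pvInsertTx d
      = (pvPairs txs).foldl (fun d p => d.modify p.1 [] (· ++ [p.2])) d := by
  induction txs generalizing d with
  | nil => rfl
  | cons tx txs ih =>
    cases h : pvTs? tx with
    | none =>
      rw [List.foldl_cons, pvPairs_cons_none txs h]
      have hstep : pvInsertTx d tx = d := by simp [pvInsertTx, h]
      rw [hstep, ih]
    | some ts =>
      rw [List.foldl_cons, pvPairs_cons_some txs h, List.foldl_cons]
      have hstep : pvInsertTx d tx = d.modify (pvKey tx) [] (· ++ [ts]) := by
        simp [pvInsertTx, h]
      rw [hstep, ih]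

theorem pvBuildB (txs : List (List (String × String))) (acc : List (String × Int)) :
    txs.foldl pvCollect acc = acc ++ pvPairs txs := by
  induction txs generalizing acc with
  | nil => simp [pvPairs]
  | cons tx txs ih =>
    cases h : pvTs? tx with
    | none =>
      rw [List.foldl_cons, pvPairs_cons_none txs h]
      have hstep : pvCollect acc tx = acc := by simp [pvCollect, h]
      rw [hstep, ih]
    | some ts =>
      rw [List.foldl_cons, pvPairs_cons_some txs h]
      have hstep : pvCollect acc tx = acc ++ [(pvKey tx, ts)] := by simp [pvCollect, h]
      rw [hstep, ih]
      simp

theorem pvSeen_fst (P : List (String × Int)) (st : PySem.Set String × Int) (p : String × Int) :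
    (pvSeenStep P st p).1 = PySem.Set.add st.1 p.1 := by
  unfold pvSeenStep
  split_ifs with h
  · rw [PySem.Set.add_of_mem ((PySem.Set.contains_iff _ _).1 h)]
  · rfl

theorem pvLB1 (P Q : List (String × Int)) (st : PySem.Set String × Int) :
    (Q.foldl (pvSeenStep P) st).1 = PySem.Set.update st.1 (Q.map (·.1)) := by
  induction Q generalizing st with
  | nil => simp [PySem.Set.update]
  | cons p Q ih =>
    simp only [List.foldl_cons, List.map_cons, PySem.Set.update_cons, ih, pvSeen_fst]

theorem pvSeen_snd (P : List (String × Int)) (st : PySem.Set String × Int) (p : String × Int) :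
    (pvSeenStep P st p).2
      = if PySem.Set.contains st.1 p.1 then st.2 else st.2 + pvG P p.1 := by
  unfold pvSeenStep pvG
  split_ifs <;> rfl

theorem pvLB2 (P Q : List (String × Int)) :
    (Q.foldl (pvSeenStep P) (PySem.Set.empty, 0)).2
      = ((PySem.Set.ofList (Q.map (·.1))).map (pvG P)).sum := by
  induction Q using List.reverseRecOn with
  | nil => simp [PySem.Set.ofList_nil]
  | append_singleton Q p ih =>
    rw [List.foldl_append, List.foldl_cons, List.foldl_nil, List.map_append, List.map_cons,
      List.map_nil, PySem.Set.ofList_append_singleton]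
    have hfst : (Q.foldl (pvSeenStep P) (PySem.Set.empty, 0)).1
        = PySem.Set.ofList (Q.map (·.1)) := by
      rw [pvLB1]; exact PySem.Set.update_nil_left _
    rw [pvSeen_snd, hfst]
    by_cases hm : p.1 ∈ PySem.Set.ofList (Q.map (·.1))
    · rw [if_pos ((PySem.Set.contains_iff _ _).2 hm), PySem.Set.add_of_mem hm, ih]
    · have hc : ¬ PySem.Set.contains (PySem.Set.ofList (Q.map (·.1))) p.1 = true := by
        intro hcc; exact hm ((PySem.Set.contains_iff _ _).1 hcc)
      rw [if_neg hc, PySem.Set.add_of_not_mem hm, ih, List.map_append, List.sum_append]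
      simp [pvG]

-- ===== VERDICT (by name: the statement is the Claim_ definition above) =====
theorem calc_retry_storm_score_py_spec : Claim_equal_calc_retry_storm_score_py := by
  intro txs _hdom
  unfold Spec_calc_retry_storm_score_py
  suffices h : (txs.foldl pvInsertTx PySem.Dict.empty).items.foldl pvGroupStep 0
      = ((txs.foldl pvCollect []).foldl (pvSeenStep (txs.foldl pvCollect []))
          (PySem.Set.empty, 0)).2 by
    simp only [calc_retry_storm_score_py, calc_retry_storm_score_py_alt, h]
  rw [pvBuildB txs []]
  rw [List.nil_append, pvLB2, pvBuildA]
  set P := pvPairs txs with hP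
  set D := P.foldl (fun d p => d.modify p.1 [] (· ++ [p.2])) PySem.Dict.empty with hD
  have hnd : D.keys.Nodup := by
    rw [hD]
    exact PySem.Dict.nodup_keys_foldl_modify_key P (fun p => p.1) [] (fun _ p => (· ++ [p.2]))
      PySem.Dict.empty (by simp [PySem.Dict.keys_empty])
  have hkeys : D.keys = PySem.Set.ofList (P.map (·.1)) := by
    rw [hD]
    rw [PySem.Dict.keys_foldl_modify_key P (fun p => p.1) [] (fun _ p => (· ++ [p.2]))
      PySem.Dict.empty]
    simp [PySem.Dict.keys_empty, PySem.Set.update_nil_left]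
  have hgd : ∀ c, D.getD c [] = (P.filter (fun p => p.1 == c)).map (·.2) := by
    intro c
    rw [hD, PySem.Dict.getD_foldl_modify_append]
    simp [PySem.Dict.getD_empty]
  rw [PySem.Dict.items_eq_map_keys D hnd [], pvFoldGroup, List.map_map, hkeys]
  have hfun : ∀ k, ((fun kv => pvStorms (PySem.List.sorted kv.2 (fun x => x) false)) ∘
      (fun k => (k, D.getD k []))) k = pvG P k := by
    intro k
    simp only [Function.comp_apply, pvG, hgd]
  rw [List.map_congr_left (fun a _ => hfun a)]
  omega
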